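-- pv_equiv track=rewrite | github.com/mritools/cupyimg | cupyimg/scipy/signal/tests/test_signaltools.py | gen_oa_shapes_2d
-- ===== SOURCE A (Python) =====
-- import itertools
--
-- def gen_oa_shapes(sizes):
--     return [
--         (a, b) for a, b in itertools.product(sizes, repeat=2) if abs(a - b) > 3
--     ]
--
-- def gen_oa_shapes_2d(sizes):
--     shapes0 = gen_oa_shapes(sizes)
--     shapes1 = gen_oa_shapes(sizes)
--     shapes = [
--         ishapes0 + ishapes1 for ishapes0, ishapes1 in zip(shapes0, shapes1)
--     ]
--
--     modes = ["full", "valid", "same"]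
--     return [
--         ishapes + (imode,)
--         for ishapes, imode in itertools.product(shapes, modes)
--         if imode != "valid"
--         or (ishapes[0] > ishapes[1] and ishapes[2] > ishapes[3])
--         or (ishapes[0] < ishapes[1] and ishapes[2] < ishapes[3])
--     ]
-- ===== SOURCE B (Python) =====
-- import itertools
--
-- def gen_oa_shapes_2d(sizes):
--     return [
--         (a, b, a, b, mode)
--         for a, b in itertools.product(sizes, repeat=2)
--         if abs(a - b) > 3
--         for mode in ["full", "valid", "same"]
--     ]
-- ===== Notes on version B (the rewrite author's own statement) =====
-- stated objective: simpler
-- what changed: Replaced the two identical gen_oa_shapes calls, the zip of the list with itself, and the redundant 'valid' filter (always true when |a-b|>3) by one direct nested comprehension emitting (a,b,a,b,mode).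
import Mathlib
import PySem

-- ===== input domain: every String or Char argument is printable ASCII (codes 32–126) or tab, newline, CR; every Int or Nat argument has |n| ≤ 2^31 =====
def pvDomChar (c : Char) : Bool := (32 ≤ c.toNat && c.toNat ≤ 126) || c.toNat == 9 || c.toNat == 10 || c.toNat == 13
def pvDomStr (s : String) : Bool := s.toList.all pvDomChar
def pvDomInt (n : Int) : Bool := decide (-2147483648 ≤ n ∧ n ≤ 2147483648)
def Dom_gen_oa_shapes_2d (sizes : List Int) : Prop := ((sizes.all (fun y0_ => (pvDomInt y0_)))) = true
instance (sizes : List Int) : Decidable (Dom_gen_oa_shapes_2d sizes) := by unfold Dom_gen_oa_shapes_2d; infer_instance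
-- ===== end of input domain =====

-- B replaces A's build-zip-filter pipeline by one nested comprehension (simpler; the 'valid' filter is provably always true).

-- ===== PORT A =====
-- itertools.product(sizes, repeat=2) filtered by abs(a-b) > 3
def gen_oa_shapes (sizes : List Int) : List (Int × Int) :=
  (sizes.flatMap (fun a => sizes.map (fun b => (a, b)))).filter (fun p => decide (|p.1 - p.2| > 3))

def gen_oa_shapes_2d (sizes : List Int) : List (Int × Int × Int × Int × String) :=
  let shapes0 := gen_oa_shapes sizes
  let shapes1 := gen_oa_shapes sizes
  let shapes := List.zipWith (fun p q => (p.1, p.2, q.1, q.2)) shapes0 shapes1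
  let modes := ["full", "valid", "same"]
  shapes.flatMap (fun s =>
    modes.filterMap (fun m =>
      if m ≠ "valid" ∨ (s.1 > s.2.1 ∧ s.2.2.1 > s.2.2.2) ∨ (s.1 < s.2.1 ∧ s.2.2.1 < s.2.2.2)
      then some (s.1, s.2.1, s.2.2.1, s.2.2.2, m) else none))

-- ===== PORT B =====
def gen_oa_shapes_2d_alt (sizes : List Int) : List (Int × Int × Int × Int × String) :=
  sizes.flatMap (fun a => sizes.flatMap (fun b =>
    if |a - b| > 3 then ["full", "valid", "same"].map (fun m => (a, b, a, b, m)) else []))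

-- ===== PRECONDITION & SPEC =====
def Spec_gen_oa_shapes_2d (sizes : List Int) (out : List (Int × Int × Int × Int × String)) : Prop := out = gen_oa_shapes_2d_alt sizes
instance (sizes : List Int) (out : List (Int × Int × Int × Int × String)) : Decidable (Spec_gen_oa_shapes_2d sizes out) := by unfold Spec_gen_oa_shapes_2d; infer_instance

-- ===== CLAIM (what is proved, stated in full; the proofs are below) =====
def Claim_equal_gen_oa_shapes_2d : Prop := ∀ (sizes : List Int), Dom_gen_oa_shapes_2d sizes → Spec_gen_oa_shapes_2d sizes (gen_oa_shapes_2d sizes)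

-- ===== LEMMAS AND PROOFS =====

theorem pv_zipWith_self {α β : Type} (f : α → α → β) (l : List α) :
    List.zipWith f l l = l.map (fun x => f x x) := by
  induction l with
  | nil => rfl
  | cons x xs ih => simp [ih]

-- flatMap over a filtered list = flatMap with an if-guard
theorem pv_flatMap_filter {α β : Type} (p : α → Bool) (f : α → List β) (l : List α) :
    (l.filter p).flatMap f = l.flatMap (fun x => if p x then f x else []) := by
  induction l with
  | nil => rfl
  | cons x xs ih =>
    by_cases h : p x = true <;> simp [h, ih]

-- when |a-b| > 3, the 'valid' condition in A's inner filter is always true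
theorem pv_modes_all (a b : Int) (h : |a - b| > 3) :
    (["full", "valid", "same"].filterMap (fun m =>
      if m ≠ "valid" ∨ (a > b ∧ a > b) ∨ (a < b ∧ a < b)
      then some (a, b, a, b, m) else none))
    = ["full", "valid", "same"].map (fun m => (a, b, a, b, m)) := by
  have hne : a > b ∧ a > b ∨ a < b ∧ a < b := by
    rcases abs_cases (a - b) with ⟨he, _⟩ | ⟨he, _⟩ <;> [left; right] <;> omega
  have hba : ¬ b = a := by omega
  simp [List.filterMap, hba]

-- one pair: A's guarded filterMap over modes vs B's if-guarded map over modes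
theorem pv_pair (a b : Int) :
    (if decide (|a - b| > 3) = true then
      (["full", "valid", "same"].filterMap (fun m =>
        if m ≠ "valid" ∨ ((a, b, a, b) : Int × Int × Int × Int).1 > (a, b, a, b).2.1 ∧ ((a,b,a,b) : Int × Int × Int × Int).2.2.1 > (a,b,a,b).2.2.2
          ∨ ((a,b,a,b) : Int × Int × Int × Int).1 < (a,b,a,b).2.1 ∧ ((a,b,a,b) : Int × Int × Int × Int).2.2.1 < (a,b,a,b).2.2.2
        then some ((a,b,a,b).1, ((a,b,a,b) : Int × Int × Int × Int).2.1, (a,b,a,b).2.2.1, (a,b,a,b).2.2.2, m) else none))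
      else [])
    = (if |a - b| > 3 then ["full", "valid", "same"].map (fun m => (a, b, a, b, m)) else []) := by
  by_cases h : |a - b| > 3
  · simp only [h, decide_true, if_true]
    exact pv_modes_all a b h
  · simp [h]

theorem pv_flatMap_flatMap {α β γ : Type} (g : α → List β) (f : β → List γ) (l : List α) :
    (l.flatMap g).flatMap f = l.flatMap (fun a => (g a).flatMap f) := by
  induction l with
  | nil => rfl
  | cons x xs ih => simp [List.flatMap_append, ih]

theorem gen_oa_shapes_2d_eq (sizes : List Int) :
    gen_oa_shapes_2d sizes = gen_oa_shapes_2d_alt sizes := by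
  unfold gen_oa_shapes_2d gen_oa_shapes_2d_alt gen_oa_shapes
  dsimp only
  rw [pv_zipWith_self, List.flatMap_map, pv_flatMap_filter, pv_flatMap_flatMap]
  congr 1
  funext a
  rw [List.flatMap_map]
  congr 1
  funext b
  exact pv_pair a b

-- ===== VERDICT (by name: the statement is the Claim_ definition above) =====
theorem gen_oa_shapes_2d_spec : Claim_equal_gen_oa_shapes_2d := by
  intro sizes _
  exact gen_oa_shapes_2d_eq sizes
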